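-- pv_equiv track=rewrite | github.com/ImperialCollegeLondon/RCDS-intermediate-general-python | 06 Dictionaries Tuples and Sets/Exercise - Compound Summaries/compound_summaries_checker.py | get_compound_list_string_summary
-- ===== SOURCE A (Python) =====
-- def get_compound_list_string_summary(compound_moles):
--     if len(compound_moles) == 0:
--         return("an empty dictionary containing no compounds ")
--     result = ""
--     for i, formula in enumerate(compound_moles):
--         result += "{} mole".format(compound_moles[formula])
--         if compound_moles[formula] != 1:
--             result += "s"
--         result += " of {}".format(formula)
--         if i == len(compound_moles) - 2:
--             result += " and "
--         elif i < len(compound_moles) - 2: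
--             result += ", "
--         else:
--             result += " "
--     return(result)
-- ===== SOURCE B (Python) =====
-- def get_compound_list_string_summary(compound_moles):
--     if len(compound_moles) == 0:
--         return "an empty dictionary containing no compounds "
--     items = ["{} mole{} of {}".format(v, "" if v == 1 else "s", k)
--              for k, v in compound_moles.items()]
--     if len(items) == 1:
--         return items[0] + " "
--     return ", ".join(items[:-1]) + " and " + items[-1] + " "
-- ===== Notes on version B (the rewrite author's own statement) =====
-- stated objective: simpler
-- what changed: B builds the list of per-compound phrases in one pass and assembles them with ', '.join over items[:-1] plus ' and ' plus the last item, replacing A's in-loop index comparisons against len-2, per-key dict lookups and repeated string concatenation.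
import Mathlib
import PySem

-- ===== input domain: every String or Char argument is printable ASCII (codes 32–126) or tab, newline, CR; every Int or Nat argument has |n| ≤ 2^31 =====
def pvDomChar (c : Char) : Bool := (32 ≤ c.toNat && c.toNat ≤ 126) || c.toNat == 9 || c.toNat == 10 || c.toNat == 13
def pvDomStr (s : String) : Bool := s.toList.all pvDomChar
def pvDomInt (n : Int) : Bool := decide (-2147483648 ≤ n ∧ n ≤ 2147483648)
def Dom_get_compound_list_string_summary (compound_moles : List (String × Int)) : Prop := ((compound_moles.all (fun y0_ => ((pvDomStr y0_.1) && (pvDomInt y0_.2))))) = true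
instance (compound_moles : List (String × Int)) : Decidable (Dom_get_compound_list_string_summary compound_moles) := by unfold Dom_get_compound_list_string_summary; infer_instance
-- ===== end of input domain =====

-- B builds the per-compound phrases in one pass and assembles them with join over
-- items[:-1] plus " and " plus the last item, instead of A's in-loop index comparisons.

-- ===== PORT A =====
-- A iterates over the dict's keys with an index and looks each value up in the dict;
-- the getD default 0 is never used: every iterated key is a key of the dict.
def get_compound_list_string_summary (compound_moles : List (String × Int)) : String :=
  if compound_moles.length == 0 then
    "an empty dictionary containing no compounds "
  else
    (PySem.List.enumerate (compound_moles.map Prod.fst) 0).foldl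
      (fun result p =>
        let v := (PySem.Dict.mk compound_moles).getD p.2 0
        let result := result ++ PySem.Int.toStr v ++ " mole"
        let result := if v ≠ 1 then result ++ "s" else result
        let result := result ++ " of " ++ p.2
        if p.1 == (compound_moles.length : Int) - 2 then result ++ " and "
        else if p.1 < (compound_moles.length : Int) - 2 then result ++ ", "
        else result ++ " ") ""

-- ===== PORT B =====
def pvPhrase (p : String × Int) : String :=
  PySem.Int.toStr p.2 ++ " mole" ++ (if p.2 == 1 then "" else "s") ++ " of " ++ p.1

def get_compound_list_string_summary_alt (compound_moles : List (String × Int)) : String :=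
  if compound_moles.length == 0 then
    "an empty dictionary containing no compounds "
  else
    let items := compound_moles.map pvPhrase
    if items.length == 1 then PySem.List.pyGetD items 0 "" ++ " "
    else PySem.Str.join ", " (PySem.List.slice items none (some (-1))) ++ " and " ++
         PySem.List.pyGetD items (-1) "" ++ " "

-- ===== PRECONDITION & SPEC =====
-- Pre_ excludes association lists with duplicate keys: a Python dict (A's actual input
-- type) cannot contain duplicate keys, so such lists do not represent any input of A.
def Pre_get_compound_list_string_summary (compound_moles : List (String × Int)) : Prop :=
  (compound_moles.map Prod.fst).Nodup
instance (compound_moles : List (String × Int)) : Decidable (Pre_get_compound_list_string_summary compound_moles) := by unfold Pre_get_compound_list_string_summary; infer_instance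
def pvWitness_get_compound_list_string_summary : (List (String × Int)) := [("H2O", 2), ("CO2", 1)]
def Spec_get_compound_list_string_summary (compound_moles : List (String × Int)) (out : String) : Prop := out = get_compound_list_string_summary_alt compound_moles
instance (compound_moles : List (String × Int)) (out : String) : Decidable (Spec_get_compound_list_string_summary compound_moles out) := by unfold Spec_get_compound_list_string_summary; infer_instance

-- ===== CLAIM (what is proved, stated in full; the proofs are below) =====
def Claim_equal_get_compound_list_string_summary : Prop := ∀ (compound_moles : List (String × Int)), Dom_get_compound_list_string_summary compound_moles → Pre_get_compound_list_string_summary compound_moles → Spec_get_compound_list_string_summary compound_moles (get_compound_list_string_summary compound_moles)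

-- ===== LEMMAS AND PROOFS =====

-- canonical join: ", " between items, " and " before the last, trailing " "
def joinP : List String → String
  | [] => ""
  | [x] => x ++ " "
  | [x, y] => x ++ " and " ++ y ++ " "
  | x :: y :: z :: t => x ++ ", " ++ joinP (y :: z :: t)

-- A's separator at index i out of n
def sepA (n i : Int) : String :=
  if i == n - 2 then " and " else if i < n - 2 then ", " else " "

-- A's loop, with the phrases precomputed
def loopA (n : Int) : List String → Int → String
  | [], _ => ""
  | p :: rest, i => p ++ sepA n i ++ loopA n rest (i + 1)

theorem str_join_cons_cons (s x y : String) (t : List String) :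
    PySem.Str.join s (x :: y :: t) = x ++ s ++ PySem.Str.join s (y :: t) := by
  simp [PySem.Str.join, PySem.Chars.join_cons_cons, String.append_assoc]

theorem foldA_eq (cm : List (String × Int)) :
    ∀ (l : List (String × Int)) (s : Int) (acc : String),
    (∀ p ∈ l, (PySem.Dict.mk cm).getD p.1 0 = p.2) →
    (PySem.List.enumerate (l.map Prod.fst) s).foldl
      (fun result p =>
        let v := (PySem.Dict.mk cm).getD p.2 0
        let result := result ++ PySem.Int.toStr v ++ " mole"
        let result := if v ≠ 1 then result ++ "s" else result
        let result := result ++ " of " ++ p.2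
        if p.1 == (cm.length : Int) - 2 then result ++ " and "
        else if p.1 < (cm.length : Int) - 2 then result ++ ", "
        else result ++ " ") acc
    = acc ++ loopA ((cm.length : Int)) (l.map pvPhrase) s
  | [], s, acc, _ => by simp [loopA]
  | (k, v) :: t, s, acc, h => by
    have hv : (PySem.Dict.mk cm).getD k 0 = v := h (k, v) (List.mem_cons_self ..)
    simp only [List.map_cons, PySem.List.enumerate_cons, List.foldl_cons]
    rw [foldA_eq cm t (s + 1) _ (fun p hp => h p (List.mem_cons_of_mem _ hp))]
    simp only [hv, loopA, pvPhrase, sepA]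
    by_cases h1 : v = 1 <;> by_cases h2 : s = (cm.length : Int) - 2 <;>
      by_cases h3 : s < (cm.length : Int) - 2 <;>
      simp [h1, h2, h3, beq_iff_eq, String.append_assoc]

theorem loopA_eq_joinP (n : Int) :
    ∀ (ps : List String) (i : Int), i + (ps.length : Int) = n → loopA n ps i = joinP ps
  | [], _, _ => rfl
  | [x], i, h => by
    have h2 : ¬ (i = n - 2) := by simp at h; omega
    have h3 : ¬ (i < n - 2) := by simp at h; omega
    simp [loopA, joinP, sepA, h2, h3, beq_iff_eq]
  | [x, y], i, h => by
    have h2 : i = n - 2 := by simp at h; omega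
    simp [loopA, joinP, sepA, h2, beq_iff_eq, String.append_assoc]
  | x :: y :: z :: t, i, h => by
    have h2 : ¬ (i = n - 2) := by simp at h; omega
    have h3 : i < n - 2 := by simp at h; omega
    rw [show loopA n (x :: y :: z :: t) i = x ++ sepA n i ++ loopA n (y :: z :: t) (i + 1) from rfl,
        loopA_eq_joinP n (y :: z :: t) (i + 1) (by simp at h ⊢; omega)]
    simp [joinP, sepA, h2, h3, beq_iff_eq, String.append_assoc]

theorem joinB (z : List String) :
    ∀ (x y : String),
    PySem.Str.join ", " ((x :: y :: z).dropLast) ++ " and " ++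
      (x :: y :: z).getLast (by simp) ++ " " = joinP (x :: y :: z) := by
  induction z with
  | nil =>
    intro x y
    simp [joinP, PySem.Str.join, PySem.Chars.join_singleton, String.append_assoc]
  | cons w z' ih =>
    intro x y
    have hd : (x :: y :: w :: z').dropLast = x :: y :: (w :: z').dropLast := by simp
    have hl : (x :: y :: w :: z').getLast (by simp) = (y :: w :: z').getLast (by simp) := by
      simp [List.getLast_cons]
    rw [hd, str_join_cons_cons, hl]
    have := ih y w
    simp only [List.dropLast_cons₂] at this ⊢
    rw [show joinP (x :: y :: w :: z') = x ++ ", " ++ joinP (y :: w :: z') from rfl, ← this]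
    simp [String.append_assoc]

theorem getD_keys (cm : List (String × Int)) (hnd : (cm.map Prod.fst).Nodup) :
    ∀ p ∈ cm, (PySem.Dict.mk cm).getD p.1 0 = p.2 := by
  intro p hp
  exact PySem.Dict.getD_of_mem_items (d := PySem.Dict.mk cm) (by simpa using hp) (by simpa using hnd) 0

-- ===== VERDICT (by name: the statement is the Claim_ definition above) =====
theorem get_compound_list_string_summary_spec : Claim_equal_get_compound_list_string_summary := by
  intro cm _ hpre
  unfold Spec_get_compound_list_string_summary
  unfold get_compound_list_string_summary get_compound_list_string_summary_alt
  match cm with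
  | [] => rfl
  | c :: t =>
    have h0 : ¬ (((c :: t).length == 0) = true) := by simp
    rw [if_neg h0, if_neg h0]
    rw [foldA_eq (c :: t) (c :: t) 0 "" (getD_keys _ hpre)]
    rw [loopA_eq_joinP ((c :: t).length : Int) ((c :: t).map pvPhrase) 0 (by simp)]
    match t with
    | [] =>
      simp [joinP, PySem.List.pyGetD_zero_cons]
    | d :: t' =>
      have hlen : ¬ (((List.map pvPhrase (c :: d :: t')).length == 1) = true) := by simp
      simp only [List.map_cons]
      rw [if_neg (by simp)]
      have hne : pvPhrase c :: pvPhrase d :: List.map pvPhrase t' ≠ [] := by simp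
      rw [PySem.List.slice_to_neg_one, PySem.List.pyGetD_neg_one (h := hne)]
      rw [← joinB (List.map pvPhrase t') (pvPhrase c) (pvPhrase d)]
      simp [String.append_assoc]
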